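-- pv_equiv track=rewrite | github.com/MosesRahnama/OperatorKO7 | scripts/audit_primitive_schema_api.py | strip_lean_comments_and_strings
-- ===== SOURCE A (Python) =====
-- def strip_lean_comments_and_strings(text: str) -> str:
--     out: list[str] = []
--     i = 0
--     n = len(text)
--     block_depth = 0
--     in_line_comment = False
--     in_string = False
--     while i < n:
--         ch = text[i]
--         nxt = text[i + 1] if i + 1 < n else ""
--
--         if in_line_comment:
--             if ch == "\n":
--                 in_line_comment = False
--                 out.append("\n")
--             else:
--                 out.append(" ")
--             i += 1
--             continue
--
--         if in_string:
--             if ch == "\\" and i + 1 < n: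
--                 out.append(" ")
--                 out.append(" ")
--                 i += 2
--                 continue
--             if ch == "\"":
--                 in_string = False
--             out.append(" " if ch != "\n" else "\n")
--             i += 1
--             continue
--
--         if block_depth > 0:
--             if ch == "/" and nxt == "-":
--                 block_depth += 1
--                 out.extend([" ", " "])
--                 i += 2
--                 continue
--             if ch == "-" and nxt == "/":
--                 block_depth -= 1
--                 out.extend([" ", " "])
--                 i += 2
--                 continue
--             out.append(" " if ch != "\n" else "\n")
--             i += 1
--             continue
--
--         if ch == "-" and nxt == "-":
--             in_line_comment = True
--             out.extend([" ", " "])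
--             i += 2
--             continue
--         if ch == "/" and nxt == "-":
--             block_depth = 1
--             out.extend([" ", " "])
--             i += 2
--             continue
--         if ch == "\"":
--             in_string = True
--             out.append(" ")
--             i += 1
--             continue
--
--         out.append(ch)
--         i += 1
--
--     return "".join(out)
-- ===== SOURCE B (Python) =====
-- def _line(text, i, out):
--     n = len(text)
--     while i < n:
--         if text[i] == "\n":
--             out.append("\n")
--             return i + 1
--         out.append(" ")
--         i += 1
--     return i
--
--
-- def _string(text, i, out):
--     n = len(text)
--     while i < n:
--         ch = text[i]
--         if ch == "\\" and i + 1 < n: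
--             out.append("  ")
--             i += 2
--         elif ch == "\"":
--             out.append(" ")
--             return i + 1
--         else:
--             out.append("\n" if ch == "\n" else " ")
--             i += 1
--     return i
--
--
-- def _block(text, i, depth, out):
--     n = len(text)
--     while i < n and depth > 0:
--         ch = text[i]
--         nxt = text[i + 1] if i + 1 < n else ""
--         if ch == "/" and nxt == "-":
--             out.append("  ")
--             depth += 1
--             i += 2
--         elif ch == "-" and nxt == "/":
--             out.append("  ")
--             depth -= 1
--             i += 2
--         else:
--             out.append("\n" if ch == "\n" else " ")
--             i += 1
--     return i
--
--
-- def strip_lean_comments_and_strings(text: str) -> str: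
--     out: list[str] = []
--     i = 0
--     n = len(text)
--     while i < n:
--         ch = text[i]
--         nxt = text[i + 1] if i + 1 < n else ""
--         if ch == "-" and nxt == "-":
--             out.append("  ")
--             i = _line(text, i + 2, out)
--         elif ch == "/" and nxt == "-":
--             out.append("  ")
--             i = _block(text, i + 2, 1, out)
--         elif ch == "\"":
--             out.append(" ")
--             i = _string(text, i + 1, out)
--         else:
--             out.append(ch)
--             i += 1
--     return "".join(out)
-- ===== Notes on version B (the rewrite author's own statement) =====
-- stated objective: alternative
-- what changed: A's single flag-driven state machine (block_depth/in_line_comment/in_string carried across every iteration of one loop) is replaced by a dispatcher loop that, on a comment/string opener, hands control to a dedicated consumer helper (line comment, string with escapes, nested block comment) that runs its own loop and returns the next index, so the normal-mode loop carries no state flags.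
import Mathlib
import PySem

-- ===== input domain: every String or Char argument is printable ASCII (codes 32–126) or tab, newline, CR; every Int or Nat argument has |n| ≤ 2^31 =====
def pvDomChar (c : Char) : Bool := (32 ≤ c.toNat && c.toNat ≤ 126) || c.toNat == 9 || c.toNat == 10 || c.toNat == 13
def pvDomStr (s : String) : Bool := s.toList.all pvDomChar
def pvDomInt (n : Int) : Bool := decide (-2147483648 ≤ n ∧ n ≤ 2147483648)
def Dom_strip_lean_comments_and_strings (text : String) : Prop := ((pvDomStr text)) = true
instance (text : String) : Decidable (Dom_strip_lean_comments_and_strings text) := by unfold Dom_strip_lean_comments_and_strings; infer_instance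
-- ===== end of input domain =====

-- B replaces A's flag-driven single state machine (block_depth/in_line_comment/in_string
-- carried across one loop) by a dispatcher loop that hands control to dedicated consumer
-- helpers (line comment / string with escapes / nested block comment); objective: alternative.


-- ===== PORT A =====
-- A's while loop over index i, ported as structural recursion on the remaining
-- character list; text[i] and the lookahead nxt = text[i+1] (empty at the end)
-- become the one-element and two-element head patterns, and the state
-- (block_depth, in_line_comment, in_string) plus the out accumulator are carried
-- exactly as in the Python.
def stripA_loop : List Char → Nat → Bool → Bool → List Char → List Char
  | [], _, _, _, acc => acc
  | ch :: [], bd, lc, st, acc =>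
    -- last character: nxt = "" in the Python, so every two-character branch is off
    if lc then
      if ch = '\n' then stripA_loop [] bd false st (acc ++ ['\n'])
      else stripA_loop [] bd true st (acc ++ [' '])
    else if st then
      stripA_loop [] bd lc (if ch = '"' then false else st)
        (acc ++ [if ch = '\n' then '\n' else ' '])
    else if 0 < bd then
      stripA_loop [] bd lc st (acc ++ [if ch = '\n' then '\n' else ' '])
    else if ch = '"' then stripA_loop [] bd lc true (acc ++ [' '])
    else stripA_loop [] bd lc st (acc ++ [ch])
  | ch :: ch2 :: rest, bd, lc, st, acc =>
    if lc then
      if ch = '\n' then stripA_loop (ch2 :: rest) bd false st (acc ++ ['\n'])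
      else stripA_loop (ch2 :: rest) bd true st (acc ++ [' '])
    else if st then
      if ch = '\\' then stripA_loop rest bd lc st (acc ++ [' ', ' '])
      else
        stripA_loop (ch2 :: rest) bd lc (if ch = '"' then false else st)
          (acc ++ [if ch = '\n' then '\n' else ' '])
    else if 0 < bd then
      if ch = '/' ∧ ch2 = '-' then stripA_loop rest (bd + 1) lc st (acc ++ [' ', ' '])
      else if ch = '-' ∧ ch2 = '/' then stripA_loop rest (bd - 1) lc st (acc ++ [' ', ' '])
      else stripA_loop (ch2 :: rest) bd lc st (acc ++ [if ch = '\n' then '\n' else ' '])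
    else if ch = '-' ∧ ch2 = '-' then stripA_loop rest bd true st (acc ++ [' ', ' '])
    else if ch = '/' ∧ ch2 = '-' then stripA_loop rest 1 lc st (acc ++ [' ', ' '])
    else if ch = '"' then stripA_loop (ch2 :: rest) bd lc true (acc ++ [' '])
    else stripA_loop (ch2 :: rest) bd lc st (acc ++ [ch])

def strip_lean_comments_and_strings (text : String) : String :=
  String.ofList (stripA_loop text.toList 0 false false [])

-- ===== PORT B =====
-- Each consumer helper returns (characters emitted, remaining input) — the Python
-- helpers' appends to the shared out list and returned index.  The lookahead
-- `i + 1 < n` checks become two-element head patterns.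
def altLine : List Char → List Char × List Char
  | [] => ([], [])
  | ch :: rest =>
    if ch = '\n' then (['\n'], rest)
    else
      let p := altLine rest
      (' ' :: p.1, p.2)

def altString : List Char → List Char × List Char
  | [] => ([], [])
  | ch :: [] =>
    -- last character: the backslash branch needs i + 1 < n
    if ch = '"' then ([' '], [])
    else ([if ch = '\n' then '\n' else ' '], [])
  | ch :: ch2 :: rest =>
    if ch = '\\' then
      let p := altString rest
      (' ' :: ' ' :: p.1, p.2)
    else if ch = '"' then ([' '], ch2 :: rest)
    else
      let p := altString (ch2 :: rest)
      ((if ch = '\n' then '\n' else ' ') :: p.1, p.2)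

def altBlock : List Char → Nat → List Char × List Char
  | l, 0 => ([], l)
  | [], _ + 1 => ([], [])
  | ch :: [], _ + 1 => ([if ch = '\n' then '\n' else ' '], [])
  | ch :: ch2 :: rest, d + 1 =>
    if ch = '/' ∧ ch2 = '-' then
      let p := altBlock rest (d + 2)
      (' ' :: ' ' :: p.1, p.2)
    else if ch = '-' ∧ ch2 = '/' then
      let p := altBlock rest d
      (' ' :: ' ' :: p.1, p.2)
    else
      let p := altBlock (ch2 :: rest) (d + 1)
      ((if ch = '\n' then '\n' else ' ') :: p.1, p.2)

-- the dispatcher loop; the fuel argument (initially the input length, enough since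
-- every step consumes at least one character) only makes the recursion structural
def altGo : Nat → List Char → List Char
  | 0, _ => []
  | _ + 1, [] => []
  | fuel + 1, ch :: rest =>
    if ch = '-' ∧ rest.head? = some '-' then
      let p := altLine rest.tail
      ' ' :: ' ' :: (p.1 ++ altGo fuel p.2)
    else if ch = '/' ∧ rest.head? = some '-' then
      let p := altBlock rest.tail 1
      ' ' :: ' ' :: (p.1 ++ altGo fuel p.2)
    else if ch = '"' then
      let p := altString rest
      ' ' :: (p.1 ++ altGo fuel p.2)
    else ch :: altGo fuel rest

def strip_lean_comments_and_strings_alt (text : String) : String :=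
  String.ofList (altGo text.toList.length text.toList)

-- ===== PRECONDITION & SPEC =====
def Spec_strip_lean_comments_and_strings (text : String) (out : String) : Prop := out = strip_lean_comments_and_strings_alt text
instance (text : String) (out : String) : Decidable (Spec_strip_lean_comments_and_strings text out) := by unfold Spec_strip_lean_comments_and_strings; infer_instance

-- ===== CLAIM (what is proved, stated in full; the proofs are below) =====
def Claim_equal_strip_lean_comments_and_strings : Prop := ∀ (text : String), Dom_strip_lean_comments_and_strings text → Spec_strip_lean_comments_and_strings text (strip_lean_comments_and_strings text)

-- ===== LEMMAS AND PROOFS =====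
theorem altLine_len (l : List Char) : (altLine l).2.length ≤ l.length := by
  induction l with
  | nil => simp [altLine]
  | cons ch rest ih =>
    simp only [altLine]
    split
    · simp
    · simp; omega

theorem altString_len (l : List Char) : (altString l).2.length ≤ l.length := by
  induction l using altString.induct with
  | case1 => simp [altString]
  | case2 => simp [altString]
  | case3 ch h => simp [altString, h]
  | case4 ch2 rest ih => simp only [List.length_cons] at ih ⊢; simp [altString]; omega
  | case5 ch2 rest h => simp [altString]
  | case6 ch ch2 rest h1 h2 ih => simp only [List.length_cons] at ih ⊢; simp [altString, h1, h2]; omega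

theorem altBlock_len (l : List Char) (d : Nat) : (altBlock l d).2.length ≤ l.length := by
  induction l, d using altBlock.induct with
  | case1 l => simp [altBlock]
  | case2 d => simp [altBlock]
  | case3 ch d => simp [altBlock]
  | case4 ch ch2 rest d h ih => simp only [List.length_cons] at ih ⊢; simp [altBlock, h]; omega
  | case5 ch ch2 rest d h1 h2 ih => simp only [List.length_cons] at ih ⊢; simp [altBlock, h1, h2]; omega
  | case6 ch ch2 rest d h1 h2 ih => simp only [List.length_cons] at ih ⊢; simp [altBlock, h1, h2]; omega

theorem altGo_nil (n : Nat) : altGo n [] = [] := by cases n <;> simp [altGo]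

theorem line_eq (l : List Char) : ∀ acc, stripA_loop l 0 true false acc =
    stripA_loop (altLine l).2 0 false false (acc ++ (altLine l).1) := by
  induction l with
  | nil => intro acc; simp [altLine, stripA_loop]
  | cons ch rest ih =>
    intro acc
    cases rest with
    | nil => by_cases h : ch = '\n' <;> simp [altLine, stripA_loop, h]
    | cons c2 r2 =>
      by_cases h : ch = '\n'
      · simp [altLine, stripA_loop, h]
      · simp [altLine, stripA_loop, h]
        rw [ih]; simp [altLine]

theorem string_eq (l : List Char) : ∀ acc, stripA_loop l 0 false true acc =
    stripA_loop (altString l).2 0 false false (acc ++ (altString l).1) := by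
  induction l using altString.induct with
  | case1 => intro acc; simp [altString, stripA_loop]
  | case2 => intro acc; simp [altString, stripA_loop]
  | case3 ch h => intro acc; simp [altString, stripA_loop, h]
  | case4 ch2 rest ih =>
    intro acc
    simp [altString, stripA_loop]
    rw [ih]; simp
  | case5 ch2 rest h =>
    intro acc
    simp [altString, stripA_loop]
  | case6 ch ch2 rest h1 h2 ih =>
    intro acc
    simp [altString, stripA_loop, h1, h2]
    rw [ih]; simp

theorem block_eq (l : List Char) (d : Nat) : ∀ acc, stripA_loop l d false false acc =
    stripA_loop (altBlock l d).2 0 false false (acc ++ (altBlock l d).1) := by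
  induction l, d using altBlock.induct with
  | case1 l => intro acc; simp [altBlock]
  | case2 d => intro acc; simp [altBlock, stripA_loop]
  | case3 ch d => intro acc; simp [altBlock, stripA_loop]
  | case4 ch ch2 rest d h ih =>
    intro acc
    simp [altBlock, stripA_loop, h]
    rw [ih]; simp
  | case5 ch ch2 rest d h1 h2 ih =>
    intro acc
    simp [altBlock, stripA_loop, h1, h2]
    rw [ih]; simp
  | case6 ch ch2 rest d h1 h2 ih =>
    intro acc
    simp [altBlock, stripA_loop, h1, h2]
    rw [ih]; simp

theorem main_eq : ∀ (n : Nat) (l : List Char), l.length ≤ n → ∀ acc,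
    stripA_loop l 0 false false acc = acc ++ altGo n l := by
  intro n
  induction n with
  | zero =>
    intro l hl acc
    cases l with
    | nil => simp [stripA_loop, altGo]
    | cons ch rest => simp at hl
  | succ n ihn =>
    intro l hl acc
    cases l with
    | nil => simp [stripA_loop, altGo]
    | cons ch rest =>
      cases rest with
      | nil =>
        by_cases h3 : ch = '"'
        · simp [stripA_loop, altGo, h3, altGo_nil, altString]
        · simp [stripA_loop, altGo, h3, altGo_nil]
      | cons c2 r2 =>
        by_cases h1 : ch = '-' ∧ c2 = '-'
        · simp [stripA_loop, altGo, h1]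
          rw [line_eq]
          rw [ihn _ (by have hb := altLine_len r2; simp at hl; omega)]
          simp
        · by_cases h2 : ch = '/' ∧ c2 = '-'
          · simp [stripA_loop, altGo, h1, h2]
            rw [block_eq]
            rw [ihn _ (by have hb := altBlock_len r2 1; simp at hl; omega)]
            simp
          · by_cases h3 : ch = '"'
            · simp [stripA_loop, altGo, h1, h2, h3]
              rw [string_eq]
              rw [ihn _ (by have hb := altString_len (c2 :: r2); simp only [List.length_cons] at hl hb; omega)]
              simp
            · simp [stripA_loop, altGo, h1, h2, h3]
              rw [ihn _ (by simp only [List.length_cons] at hl ⊢; omega)]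
              simp

-- ===== VERDICT (by name: the statement is the Claim_ definition above) =====
theorem strip_lean_comments_and_strings_spec : Claim_equal_strip_lean_comments_and_strings := by
  intro text _
  unfold Spec_strip_lean_comments_and_strings strip_lean_comments_and_strings strip_lean_comments_and_strings_alt
  rw [main_eq text.toList.length _ le_rfl]
  simp
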